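-- pv_equiv track=rewrite | github.com/y6asdf/haha | algorithm/1.py | anagrmSolution1
-- ===== SOURCE A (Python) =====
-- def anagrmSolution1(s1,s2):
--     alist = list(s2)
--     pos1 = 0
--     stillok = True
--     while pos1 < len(s1) and stillok:
--         pos2 = 0
--         found = False
--         while pos2 < len(alist) and not found:
--             if s1[pos1]==alist[pos2]:
--                 found = True
--             else:
--                 pos2 +=1
--         if found:
--             alist[pos2] = None
--         else:
--             stillok = False
--         pos1 +=1
--     return stillok
-- ===== SOURCE B (Python) =====
-- def anagrmSolution1(s1, s2):
--     counts = {}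
--     for ch in s2:
--         counts[ch] = counts.get(ch, 0) + 1
--     for ch in s1:
--         if counts.get(ch, 0) == 0:
--             return False
--         counts[ch] = counts[ch] - 1
--     return True
-- ===== Notes on version B (the rewrite author's own statement) =====
-- stated objective: faster
-- what changed: Replaces the quadratic scan-and-blank search over a copy of s2 with a single character-count dictionary of s2 that is decremented per character of s1.
import Mathlib
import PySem

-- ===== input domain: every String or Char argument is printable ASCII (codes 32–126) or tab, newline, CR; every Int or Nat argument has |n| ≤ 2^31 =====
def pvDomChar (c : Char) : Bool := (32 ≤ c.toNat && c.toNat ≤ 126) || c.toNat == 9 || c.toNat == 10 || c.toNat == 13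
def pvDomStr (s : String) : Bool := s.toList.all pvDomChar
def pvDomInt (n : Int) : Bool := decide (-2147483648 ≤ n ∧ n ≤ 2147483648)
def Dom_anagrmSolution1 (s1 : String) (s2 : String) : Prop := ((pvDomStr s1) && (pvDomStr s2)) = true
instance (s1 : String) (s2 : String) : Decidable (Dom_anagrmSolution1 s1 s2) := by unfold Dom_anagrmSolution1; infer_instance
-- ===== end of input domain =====

-- B replaces A's quadratic scan-and-blank search over a copy of s2 with a single
-- character-count dictionary of s2 decremented per character of s1 (objective: faster).

-- ===== PORT A =====
-- inner while loop: scan alist left to right for the first cell equal to `some c`;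
-- if found, blank it to `none` and return the updated list, else report failure (none)
def pvAFind (c : Char) : List (Option Char) → Option (List (Option Char))
  | [] => none
  | x :: xs => if x == some c then some (none :: xs) else (pvAFind c xs).map (x :: ·)

-- outer while loop over the characters of s1 (stillok = still in the loop)
def pvALoop : List Char → List (Option Char) → Bool
  | [], _ => true
  | c :: cs, al =>
    match pvAFind c al with
    | some al' => pvALoop cs al'
    | none => false

def anagrmSolution1 (s1 : String) (s2 : String) : Bool :=
  pvALoop s1.toList (s2.toList.map some)

-- ===== PORT B =====
-- second loop of Source B: per character of s1, fail on count 0, else decrement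
def pvBLoop (d : PySem.Dict Char Int) : List Char → Bool
  | [] => true
  | c :: cs =>
    if d.getD c 0 == 0 then false
    else pvBLoop (d.insert c (d.getD c 0 - 1)) cs

def anagrmSolution1_alt (s1 : String) (s2 : String) : Bool :=
  pvBLoop (s2.toList.foldl (fun d x => d.insert x (d.getD x 0 + 1)) PySem.Dict.empty) s1.toList

-- ===== PRECONDITION & SPEC =====
def Spec_anagrmSolution1 (s1 : String) (s2 : String) (out : Bool) : Prop := out = anagrmSolution1_alt s1 s2
instance (s1 : String) (s2 : String) (out : Bool) : Decidable (Spec_anagrmSolution1 s1 s2 out) := by unfold Spec_anagrmSolution1; infer_instance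

-- ===== CLAIM (what is proved, stated in full; the proofs are below) =====
def Claim_equal_anagrmSolution1 : Prop := ∀ (s1 : String) (s2 : String), Dom_anagrmSolution1 s1 s2 → Spec_anagrmSolution1 s1 s2 (anagrmSolution1 s1 s2)

-- ===== LEMMAS AND PROOFS =====

-- if `some c` does not occur in al, A's inner scan fails
theorem pvAFind_eq_none {c : Char} {al : List (Option Char)}
    (h : al.count (some c) = 0) : pvAFind c al = none := by
  induction al with
  | nil => rfl
  | cons x xs ih =>
    rw [List.count_cons] at h
    have hx : x ≠ some c := fun hx => by simp [hx] at h
    have hxs := ih (by simpa [hx] using h)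
    simp [pvAFind, hx, hxs]

-- if `some c` occurs in al, A's inner scan succeeds and the result has one fewer
-- `some c` and the same number of every other `some c'`
theorem pvAFind_eq_some {c : Char} {al : List (Option Char)}
    (h : al.count (some c) ≠ 0) :
    ∃ al', pvAFind c al = some al' ∧
      al.count (some c) = al'.count (some c) + 1 ∧
      ∀ c', c' ≠ c → al'.count (some c') = al.count (some c') := by
  induction al with
  | nil => simp at h
  | cons x xs ih =>
    by_cases hx : x = some c
    · refine ⟨none :: xs, ?_, ?_, ?_⟩
      · simp [pvAFind, hx]
      · subst hx; simp
      · intro c' hc'; subst hx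
        simp [Ne.symm hc']
    · rw [List.count_cons] at h
      have hxc : ¬ (x == some c) = true := by simp [hx]
      have hx0 : xs.count (some c) ≠ 0 := by
        by_cases hb : x = some c
        · exact absurd hb hx
        · simp [hb] at h; exact h
      obtain ⟨al', hfind, hcnt, hoth⟩ := ih hx0
      refine ⟨x :: al', ?_, ?_, ?_⟩
      · simp [pvAFind, hxc, hfind]
      · simp [List.count_cons, hxc, hcnt]
      · intro c' hc'
        simp [List.count_cons, hoth c' hc']

-- main invariant: when the dictionary counts exactly the remaining `some` cells,
-- A's outer loop and B's decrement loop agree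
theorem pvLoop_eq (cs : List Char) :
    ∀ (al : List (Option Char)) (d : PySem.Dict Char Int),
    (∀ c, d.getD c 0 = (al.count (some c) : Int)) →
    pvALoop cs al = pvBLoop d cs := by
  induction cs with
  | nil => intro al d _; rfl
  | cons c cs ih =>
    intro al d hinv
    by_cases hc : al.count (some c) = 0
    · have hfind := pvAFind_eq_none hc
      have hd : d.getD c 0 = 0 := by rw [hinv c, hc]; rfl
      simp [pvALoop, pvBLoop, hfind, hd]
    · obtain ⟨al', hfind, hcnt, hoth⟩ := pvAFind_eq_some hc
      have hd : ¬ (d.getD c 0 == 0) = true := by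
        rw [hinv c]; simpa using fun h => hc (by exact_mod_cast h)
      rw [pvALoop, hfind]
      rw [pvBLoop, if_neg hd]
      apply ih
      intro c'
      rw [PySem.Dict.getD_insert]
      by_cases hcc : c' = c
      · subst hcc; rw [if_pos rfl, hinv c', hcnt]; push_cast; ring
      · rw [if_neg hcc, hinv c', hoth c' hcc]

-- counting `some c` in a `map some` list counts c
theorem count_some_map (c : Char) (l : List Char) :
    (l.map some).count (some c) = l.count c := by
  induction l with
  | nil => rfl
  | cons x xs ih => simp [List.count_cons, ih]

-- ===== VERDICT (by name: the statement is the Claim_ definition above) =====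
theorem anagrmSolution1_spec : Claim_equal_anagrmSolution1 := by
  intro s1 s2 _
  unfold Spec_anagrmSolution1 anagrmSolution1 anagrmSolution1_alt
  rw [PySem.Dict.foldl_insert_getD_add_one_eq_counter]
  apply pvLoop_eq
  intro c
  rw [PySem.Dict.getD_counter, count_some_map]
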